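-- pv_equiv track=rewrite | github.com/koskin17/MyEducation | Обучение/CodeWars/итерация двух строк по длинной строке.py | transpose_two_strings
-- ===== SOURCE A (Python) =====
-- def transpose_two_strings(arr):
--     l = []
--     s1 = ''
--     s2 = ''
--     if len(arr[0]) < len(arr[1]) or arr[0] == '':
--         s1 = arr[0] + ' '*(len(arr[1]) - len(arr[0]))
--         s2 = arr[1]
--     elif len(arr[1]) < len(arr[0]) or arr[1] == '':
--             s1 = arr[0]
--             s2 = arr[1] + ' '*(len(arr[0]) - len(arr[1]))
--     else:
--         s1 = arr[0]
--         s2 = arr[1]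
--     for x,y in zip(s1, s2):
--         tmp = x + ' ' + y
--         l.append(tmp)
--     return '\n'.join(l)
-- ===== SOURCE B (Python) =====
-- def transpose_two_strings(arr):
--     def go(a, b):
--         row = (a[0] if a else ' ') + ' ' + (b[0] if b else ' ')
--         ra, rb = a[1:], b[1:]
--         if not ra and not rb:
--             return row
--         return row + '\n' + go(ra, rb)
--     a, b = arr[0], arr[1]
--     return '' if not a and not b else go(a, b)
-- ===== Notes on version B (the rewrite author's own statement) =====
-- stated objective: simpler
-- what changed: A's staged pipeline (three-way conditional padding to equal lengths, a zip loop appending rows to a list, then '\n'.join) is replaced by a single recursion over both strings that emits the output string directly, filling an exhausted side with a space at each step, so the padding phase, the row list and the join all disappear.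
import Mathlib
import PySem

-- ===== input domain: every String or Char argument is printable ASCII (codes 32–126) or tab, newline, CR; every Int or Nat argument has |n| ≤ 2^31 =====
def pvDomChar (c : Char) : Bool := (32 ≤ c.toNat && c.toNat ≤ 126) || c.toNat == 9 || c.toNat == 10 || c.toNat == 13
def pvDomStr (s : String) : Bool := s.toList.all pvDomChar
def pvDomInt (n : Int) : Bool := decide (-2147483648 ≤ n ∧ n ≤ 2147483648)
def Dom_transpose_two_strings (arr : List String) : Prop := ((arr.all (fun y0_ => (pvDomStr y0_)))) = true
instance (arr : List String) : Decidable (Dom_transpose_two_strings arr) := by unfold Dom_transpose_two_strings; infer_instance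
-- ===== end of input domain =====

-- B replaces A's staged pipeline (conditional padding, zip loop into a row list, '\n'.join)
-- by a direct recursion over both strings that emits the result string itself, padding
-- implicitly at the base of each step (objective: simpler).

-- ===== PORT A =====
-- A's padding branches, then the zip loop building "x y" rows, joined with '\n'.
def transpose_two_strings (arr : List String) : String :=
  match arr with
  | a :: b :: _ =>
    let la := a.toList
    let lb := b.toList
    let p : List Char × List Char :=
      if la.length < lb.length ∨ la = [] then
        (la ++ List.replicate (lb.length - la.length) ' ', lb)
      else if lb.length < la.length ∨ lb = [] then
        (la, lb ++ List.replicate (la.length - lb.length) ' ')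
      else
        (la, lb)
    String.mk (PySem.Chars.join ['\n'] ((p.1.zip p.2).map (fun q => [q.1, ' ', q.2])))
  | _ => ""  -- arr[0] or arr[1] raises IndexError in Python; excluded by Pre_

-- ===== PORT B =====
-- Source B's inner 'go': build the current row from the heads (space if exhausted), then
-- either stop (both tails empty) or append '\n' and recurse on the tails.
def transposeGo (a b : List Char) : List Char :=
  let row : List Char := [a.headD ' ', ' ', b.headD ' ']
  if a.tail = [] ∧ b.tail = [] then row
  else row ++ '\n' :: transposeGo a.tail b.tail
termination_by a.length + b.length
decreasing_by cases a <;> cases b <;> simp_all <;> omega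

def transpose_two_strings_alt (arr : List String) : String :=
  -- arr[0]/arr[1]: on lists shorter than 2 Python raises IndexError (outside Pre_),
  -- so the default "" is never reached inside the claim
  let a := (arr.getD 0 "").toList
  let b := (arr.getD 1 "").toList
  if a = [] ∧ b = [] then "" else String.mk (transposeGo a b)

-- ===== PRECONDITION & SPEC =====
-- Pre_ excludes exactly the lists with fewer than two elements, on which A raises IndexError.
def Pre_transpose_two_strings (arr : List String) : Prop := 2 ≤ arr.length
instance (arr : List String) : Decidable (Pre_transpose_two_strings arr) := by
  unfold Pre_transpose_two_strings; infer_instance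
def pvWitness_transpose_two_strings : List String := ["ab", "cde"]

def Spec_transpose_two_strings (arr : List String) (out : String) : Prop := out = transpose_two_strings_alt arr
instance (arr : List String) (out : String) : Decidable (Spec_transpose_two_strings arr out) := by unfold Spec_transpose_two_strings; infer_instance

-- ===== CLAIM (what is proved, stated in full; the proofs are below) =====
def Claim_equal_transpose_two_strings : Prop := ∀ (arr : List String), Dom_transpose_two_strings arr → Pre_transpose_two_strings arr → Spec_transpose_two_strings arr (transpose_two_strings arr)

-- ===== LEMMAS AND PROOFS =====

-- proof helper: the list of rows B's recursion walks through, one per step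
def pvRows (a b : List Char) : List (List Char) :=
  if a = [] ∧ b = [] then []
  else [a.headD ' ', ' ', b.headD ' '] :: pvRows a.tail b.tail
termination_by a.length + b.length
decreasing_by cases a <;> cases b <;> simp_all <;> omega

-- B's recursion is the '\n'-join of its row list
theorem pv_go_join (a b : List Char) (h : ¬ (a = [] ∧ b = [])) :
    transposeGo a b = PySem.Chars.join ['\n'] (pvRows a b) := by
  rw [pvRows]
  simp only [h, if_false]
  by_cases ht : a.tail = [] ∧ b.tail = []
  · rw [transposeGo]
    simp only [ht, if_pos, and_self, if_true]
    rw [pvRows]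
    simp [ht, PySem.Chars.join_singleton]
  · rw [transposeGo]
    simp only [ht, if_false]
    rw [pv_go_join a.tail b.tail ht]
    have : pvRows a.tail b.tail ≠ [] := by
      rw [pvRows]; simp [ht]
    rcases hr : pvRows a.tail b.tail with _ | ⟨r, rs⟩
    · exact absurd hr this
    · simp [PySem.Chars.join_cons_cons, List.append_assoc]
termination_by a.length + b.length
decreasing_by
  have h1 := List.length_tail (l := a)
  have h2 := List.length_tail (l := b)
  rcases not_and_or.mp ht with h' | h' <;>
    (have h3 := List.length_pos_iff.mpr h'; omega)

-- the row list equals the indexed form over the longer length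
theorem pv_rows_idx (a b : List Char) :
    pvRows a b = (List.range (max a.length b.length)).map (fun i =>
      [(if i < a.length then a.getD i ' ' else ' '), ' ',
       (if i < b.length then b.getD i ' ' else ' ')]) := by
  rcases a with _ | ⟨x, xs⟩ <;> rcases b with _ | ⟨y, ys⟩
  · rw [pvRows]; simp
  · rw [pvRows]
    simp only [List.length_nil, List.length_cons, Nat.max_eq_right (Nat.zero_le _),
      List.range_succ_eq_map, List.map_cons, List.map_map, List.tail_nil, List.tail_cons]
    rw [pv_rows_idx [] ys]
    simp [List.getD]
  · rw [pvRows]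
    simp only [List.length_nil, List.length_cons, Nat.max_eq_left (Nat.zero_le _),
      List.range_succ_eq_map, List.map_cons, List.map_map, List.tail_nil, List.tail_cons]
    rw [pv_rows_idx xs []]
    simp [List.getD]
  · rw [pvRows]
    simp only [List.length_cons, Nat.succ_max_succ, List.range_succ_eq_map,
      List.map_cons, List.map_map, List.tail_cons]
    rw [pv_rows_idx xs ys]
    simp [List.getD]
termination_by a.length + b.length
decreasing_by all_goals simp <;> omega

-- left-padded zip equals the indexed form, when the left side is the shorter one
theorem pv_zip_pad_left (la lb : List Char) (h : la.length ≤ lb.length) :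
    (la ++ List.replicate (lb.length - la.length) ' ').zip lb
      = (List.range lb.length).map (fun i =>
          ((if i < la.length then la.getD i ' ' else ' '), lb.getD i ' ')) := by
  apply List.ext_getElem
  · simp [h]
  · intro i h1 h2
    have hi : i < lb.length := by simpa using h2
    simp only [List.getElem_zip, List.getElem_map, List.getElem_range, Prod.mk.injEq]
    constructor
    · by_cases hc : i < la.length
      · simp [hc, List.getD]
      · simp [List.getElem_append, hc]
    · simp [List.getD, List.getElem?_eq_getElem hi]

-- right-padded zip equals the indexed form, when the right side is the shorter one
theorem pv_zip_pad_right (la lb : List Char) (h : lb.length ≤ la.length) :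
    la.zip (lb ++ List.replicate (la.length - lb.length) ' ')
      = (List.range la.length).map (fun i =>
          (la.getD i ' ', (if i < lb.length then lb.getD i ' ' else ' '))) := by
  apply List.ext_getElem
  · simp; omega
  · intro i h1 h2
    have hi : i < la.length := by simpa using h2
    simp only [List.getElem_zip, List.getElem_map, List.getElem_range, Prod.mk.injEq]
    constructor
    · simp [List.getD, List.getElem?_eq_getElem hi]
    · by_cases hc : i < lb.length
      · simp [hc, List.getD]
      · simp [List.getElem_append, hc]

-- the rows built by A's padded zip equal the indexed form
theorem pv_rows_eq (la lb : List Char) :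
    (let p : List Char × List Char :=
      if la.length < lb.length ∨ la = [] then
        (la ++ List.replicate (lb.length - la.length) ' ', lb)
      else if lb.length < la.length ∨ lb = [] then
        (la, lb ++ List.replicate (la.length - lb.length) ' ')
      else
        (la, lb);
    ((p.1.zip p.2).map (fun q => [q.1, ' ', q.2])))
      = (List.range (max la.length lb.length)).map (fun i =>
          [(if i < la.length then la.getD i ' ' else ' '),  ' ',
           (if i < lb.length then lb.getD i ' ' else ' ')]) := by
  by_cases h1 : la.length < lb.length ∨ la = []
  · have hle : la.length ≤ lb.length := by
      rcases h1 with h | h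
      · omega
      · simp [h]
    have hmax : max la.length lb.length = lb.length := by omega
    simp only [h1, if_pos, hmax]
    rw [pv_zip_pad_left la lb hle, List.map_map]
    apply List.map_congr_left
    intro i hi
    have : i < lb.length := List.mem_range.mp hi
    simp [this]
  · by_cases h2 : lb.length < la.length ∨ lb = []
    · have hle : lb.length ≤ la.length := by
        rcases h2 with h | h
        · omega
        · simp [h]
      have hmax : max la.length lb.length = la.length := by omega
      simp only [h1, h2, ite_false, ite_true, hmax]
      rw [pv_zip_pad_right la lb hle, List.map_map]
      apply List.map_congr_left
      intro i hi
      have : i < la.length := List.mem_range.mp hi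
      simp [this]
    · have heq : la.length = lb.length := by omega
      have hmax : max la.length lb.length = lb.length := by omega
      simp only [h1, h2, ite_false, hmax]
      have := pv_zip_pad_left la lb (le_of_eq heq)
      rw [heq, Nat.sub_self, List.replicate_zero, List.append_nil] at this
      rw [this, List.map_map]
      apply List.map_congr_left
      intro i hi
      have hib : i < lb.length := List.mem_range.mp hi
      have hia : i < la.length := by omega
      simp [hia, hib]

-- ===== VERDICT (by name: the statement is the Claim_ definition above) =====
theorem transpose_two_strings_spec : Claim_equal_transpose_two_strings := by
  intro arr _ hpre
  unfold Spec_transpose_two_strings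
  match arr with
  | a :: b :: rest =>
    show transpose_two_strings (a :: b :: rest) = transpose_two_strings_alt (a :: b :: rest)
    unfold transpose_two_strings transpose_two_strings_alt
    simp only [List.getD_cons_zero, List.getD_cons_succ]
    rw [pv_rows_eq a.toList b.toList]
    by_cases h : a.toList = [] ∧ b.toList = []
    · simp [h.1, h.2, PySem.Chars.join, List.intercalate]
      rfl
    · rw [if_neg h, pv_go_join a.toList b.toList h, pv_rows_idx]
  | [] => exact absurd hpre (by simp [Pre_transpose_two_strings])
  | [a] => exact absurd hpre (by simp [Pre_transpose_two_strings])
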